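-- pv_equiv track=rewrite | github.com/Luka-Peralta-Perez/AyED1-2025-TPs- | TP4/Ejercicio_3_tp4.py | obtener_claves
-- ===== SOURCE A (Python) =====
-- def obtener_claves(clave_maestra: str) -> tuple:
--     """
--     Obtiene las dos claves a partir de la clave maestra.
--
--     Pre:
--         - clave_maestra (str): La clave maestra como una cadena de caracteres.
--
--     Post:
--         - tuple: Una tupla con las dos claves (clave1, clave2).
--     """
--     clave1 = []
--     clave2 = []
--     for i in range(len(clave_maestra)):
--         if i % 2 == 0:
--             clave1.append(clave_maestra[i])
--         else:
--             clave2.append(clave_maestra[i])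
--
--     return ''.join(clave1), ''.join(clave2)
-- ===== SOURCE B (Python) =====
-- def obtener_claves(clave_maestra: str) -> tuple:
--     return clave_maestra[::2], clave_maestra[1::2]
-- ===== Notes on version B (the rewrite author's own statement) =====
-- stated objective: idiomatic
-- what changed: Replaces the index loop with parity branching and two accumulator lists by two strided slices s[::2] and s[1::2].
import Mathlib
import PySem

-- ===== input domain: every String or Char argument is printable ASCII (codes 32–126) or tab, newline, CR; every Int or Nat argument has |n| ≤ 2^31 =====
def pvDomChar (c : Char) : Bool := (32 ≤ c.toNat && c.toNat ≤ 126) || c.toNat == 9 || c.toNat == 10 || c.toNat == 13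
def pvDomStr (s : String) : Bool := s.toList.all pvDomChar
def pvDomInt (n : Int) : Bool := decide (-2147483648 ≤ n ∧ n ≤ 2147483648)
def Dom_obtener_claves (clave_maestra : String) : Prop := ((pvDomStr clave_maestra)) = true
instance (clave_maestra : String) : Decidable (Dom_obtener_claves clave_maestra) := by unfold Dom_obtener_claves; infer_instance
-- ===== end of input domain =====

-- B replaces the index loop with its parity branch and two accumulator lists by the two strided slices s[::2] and s[1::2] (idiomatic).

-- ===== PORT A =====
def obtener_claves (clave_maestra : String) : String × String :=
  let cs := clave_maestra.toList
  let p := (PySem.List.pyRange 0 (PySem.List.len cs) 1).foldl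
    (fun (acc : List Char × List Char) i =>
      if PySem.Int.mod i 2 = 0 then (acc.1 ++ [PySem.List.pyGetD cs i ' '], acc.2)
      else (acc.1, acc.2 ++ [PySem.List.pyGetD cs i ' ']))
    ([], [])
  (String.ofList p.1, String.ofList p.2)

-- ===== PORT B =====
def obtener_claves_alt (clave_maestra : String) : String × String :=
  ((PySem.Str.slice? clave_maestra none none 2).getD "",
   (PySem.Str.slice? clave_maestra (some 1) none 2).getD "")

-- ===== PRECONDITION & SPEC =====
def Spec_obtener_claves (clave_maestra : String) (out : String × String) : Prop := out = obtener_claves_alt clave_maestra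
instance (clave_maestra : String) (out : String × String) : Decidable (Spec_obtener_claves clave_maestra out) := by unfold Spec_obtener_claves; infer_instance

-- ===== CLAIM (what is proved, stated in full; the proofs are below) =====
def Claim_equal_obtener_claves : Prop := ∀ (clave_maestra : String), Dom_obtener_claves clave_maestra → Spec_obtener_claves clave_maestra (obtener_claves clave_maestra)

-- ===== LEMMAS AND PROOFS =====
mutual
def pvEvens : List Char → List Char
  | [] => []
  | a :: t => a :: pvOdds t
def pvOdds : List Char → List Char
  | [] => []
  | _ :: t => pvEvens t
end

theorem pv_filt_both (cs : List Char) :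
    (List.filterMap (fun k => cs[2*k]?) (List.range ((cs.length+1)/2)) = pvEvens cs) ∧
    (List.filterMap (fun k => cs[2*k+1]?) (List.range (cs.length/2)) = pvOdds cs) := by
  induction cs with
  | nil => simp [pvEvens, pvOdds]
  | cons a t ih =>
    constructor
    · have hc : ((a :: t).length + 1) / 2 = t.length / 2 + 1 := by simp; omega
      rw [hc, List.range_succ_eq_map, List.filterMap_cons, List.filterMap_map]
      have h2 : ((fun k => (a :: t)[2*k]?) ∘ Nat.succ) = (fun k => t[2*k+1]?) := by
        funext k
        show (a :: t)[2*(k+1)]? = t[2*k+1]?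
        have h : 2*(k+1) = (2*k+1) + 1 := by omega
        rw [h, List.getElem?_cons_succ]
      rw [h2, ih.2]
      simp [pvEvens]
    · have hc : (a :: t).length / 2 = (t.length + 1) / 2 := by simp
      rw [hc]
      have h2 : (fun k => (a :: t)[2*k+1]?) = (fun k => t[2*k]?) := by
        funext k; rw [List.getElem?_cons_succ]
      rw [h2, ih.1]
      simp [pvOdds]

theorem pv_slice_even (cs : List Char) :
    PySem.List.slice? cs none none 2 = some (pvEvens cs) := by
  have h := (pv_filt_both cs).1
  simp only [PySem.List.slice?, PySem.List.sliceIndices]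
  norm_num
  rw [← h]
  have hf : (fun x : Nat => cs[(2*(x:Int)).toNat]?) = fun k => cs[2*k]? := by
    funext k; rw [show (2*(k:Int)).toNat = 2*k from by omega]
  have hcount : (if 0 < cs.length then (((cs.length:Int) + 2 - 1) / 2).toNat else 0) = (cs.length+1)/2 := by
    split_ifs with h0
    · omega
    · omega
  rw [hf, hcount]

theorem pv_slice_odd (cs : List Char) :
    PySem.List.slice? cs (some 1) none 2 = some (pvOdds cs) := by
  have h := (pv_filt_both cs).2
  simp only [PySem.List.slice?, PySem.List.sliceIndices]
  norm_num
  rw [← h]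
  rcases cs with _ | ⟨a, t⟩
  · simp
  · have hm : min 1 ((a :: t).length : Int) = 1 := by simp
    rw [hm]
    have hf : (fun x : Nat => (a :: t)[(1 + 2*(x:Int)).toNat]?) = fun k => (a :: t)[2*k+1]? := by
      funext k; rw [show (1 + 2*(k:Int)).toNat = 2*k+1 from by omega]
    have hcount : (if 1 < (a :: t).length then ((((a :: t).length:Int) - 1 + 2 - 1) / 2).toNat else 0) = (a :: t).length/2 := by
      simp only [List.length_cons] at *
      split_ifs with h0
      · omega
      · omega
    rw [hf, hcount]

theorem pv_foldA (cs : List Char) (s : Int) (a b : List Char) :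
    (PySem.List.enumerate cs s).foldl
      (fun (acc : List Char × List Char) (p : Int × Char) =>
        if PySem.Int.mod p.1 2 = 0 then (acc.1 ++ [p.2], acc.2) else (acc.1, acc.2 ++ [p.2]))
      (a, b)
    = if PySem.Int.mod s 2 = 0 then (a ++ pvEvens cs, b ++ pvOdds cs)
      else (a ++ pvOdds cs, b ++ pvEvens cs) := by
  induction cs generalizing s a b with
  | nil =>
    simp only [PySem.List.enumerate_nil, List.foldl_nil, pvEvens, pvOdds]
    split_ifs <;> simp
  | cons c t ih =>
    rw [PySem.List.enumerate_cons, List.foldl_cons]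
    by_cases hs : PySem.Int.mod s 2 = 0
    · have hs1 : ¬ PySem.Int.mod (s+1) 2 = 0 := by
        simp only [PySem.Int.mod, Int.fmod_eq_emod] at *; omega
      simp only [hs, if_true]
      rw [ih]
      simp only [hs1, if_false, pvEvens, pvOdds]
      simp
    · have hs1 : PySem.Int.mod (s+1) 2 = 0 := by
        simp only [PySem.Int.mod, Int.fmod_eq_emod] at *; omega
      simp only [if_neg hs]
      rw [ih]
      simp only [hs1, if_true, pvEvens, pvOdds]
      simp

-- ===== VERDICT (by name: the statement is the Claim_ definition above) =====
theorem obtener_claves_spec : Claim_equal_obtener_claves := by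
  intro s _
  unfold Spec_obtener_claves obtener_claves obtener_claves_alt
  have hA := pv_foldA s.toList 0 [] []
  rw [PySem.List.enumerate_eq_map_pyRange s.toList ' ', List.foldl_map] at hA
  rw [if_pos (show PySem.Int.mod 0 2 = 0 from by decide)] at hA
  simp only [List.nil_append] at hA
  simp only [PySem.Str.slice?, PySem.Chars.slice?_eq_listSlice?, pv_slice_even, pv_slice_odd]
  rw [hA]
  simp
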